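-- pv_equiv track=rewrite | github.com/jcmgray/quimb | quimb/tensor/tensor_2d.py | gen_2d_plaquettes
-- ===== SOURCE A (Python) =====
-- from itertools import product, cycle, combinations, count, chain
--
-- def gen_2d_plaquette(coo0, steps):
--     """Generate a plaquette at site ``coo0`` by stepping first in ``steps`` and
--     then the reverse steps.
--
--     Parameters
--     ----------
--     coo0 : tuple
--         The coordinate of the first site in the plaquette.
--     steps : tuple
--         The steps to take to generate the plaquette. Each element should be
--         one of ``('x+', 'x-', 'y+', 'y-')``.
--
--     Yields
--     ------
--     coo : tuple
--         The coordinates of the sites in the plaquette, including the last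
--         site which will be the same as the first.
--     """
--     x, y = coo0
--     smap = {"+": +1, "-": -1}
--     step_backs = []
--     yield x, y
--     for step in steps:
--         d, s = step
--         x, y = {
--             "x": (x + smap[s], y),
--             "y": (x, y + smap[s]),
--         }[d]
--         yield x, y
--         step_backs.append(d + "-" if s == "+" else "-")
--     for step in step_backs:
--         d, s = step
--         x, y = {
--             "x": (x + smap[s], y),
--             "y": (x, y + smap[s]),
--         }[d]
--         yield x, y
--
-- def gen_2d_plaquettes(Lx, Ly, tiling):
--     """Generate a tiling of plaquettes in a square 2D lattice.
--
--     Parameters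
--     ----------
--     Lx : int
--         The length of the lattice in the x direction.
--     Ly : int
--         The length of the lattice in the y direction.
--     tiling : {'1', '2', 'full'}
--         The tiling to use:
--
--         - '1': plaquettes in a checkerboard pattern, such that each edge
--             is covered by a maximum of one plaquette.
--         - '2' or 'full': dense tiling of plaquettes. All bulk edges will
--             be covered twice.
--
--     Yields
--     ------
--     plaquette : tuple[tuple[int]]
--         The coordinates of the sites in each plaquette, including the last
--         site which will be the same as the first.
--     """
--     if str(tiling) == "1":
--         for x, y in product(range(Lx), range(Ly)):
--             if ((x + y) % 2 == 0) and (x < Lx - 1 and y < Ly - 1):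
--                 yield tuple(gen_2d_plaquette((x, y), ("x+", "y+")))
--     elif str(tiling) in ("2", "full"):
--         for x, y in product(range(Lx), range(Ly)):
--             if x < Lx - 1 and y < Ly - 1:
--                 yield tuple(gen_2d_plaquette((x, y), ("x+", "y+")))
--     else:
--         raise ValueError("`tiling` must be one of: '1', '2', 'full'.")
-- ===== SOURCE B (Python) =====
-- def gen_2d_plaquettes(Lx, Ly, tiling):
--     t = str(tiling)
--     if t == "1":
--         for x in range(Lx - 1):
--             for y in range(Ly - 1):
--                 if (x + y) % 2 == 0:
--                     yield ((x, y), (x + 1, y), (x + 1, y + 1), (x, y + 1), (x, y))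
--     elif t in ("2", "full"):
--         for x in range(Lx - 1):
--             for y in range(Ly - 1):
--                 yield ((x, y), (x + 1, y), (x + 1, y + 1), (x, y + 1), (x, y))
--     else:
--         raise ValueError("`tiling` must be one of: '1', '2', 'full'.")
-- ===== Notes on version B (the rewrite author's own statement) =====
-- stated objective: simpler
-- what changed: Instead of calling the generic plaquette-stepping helper (direction dict, step_backs accumulation and reverse walk), B yields the closed-form square corner tuple ((x,y),(x+1,y),(x+1,y+1),(x,y+1),(x,y)) directly, iterating over the truncated ranges range(Lx-1) x range(Ly-1) so the in-loop boundary guard disappears.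
import Mathlib
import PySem

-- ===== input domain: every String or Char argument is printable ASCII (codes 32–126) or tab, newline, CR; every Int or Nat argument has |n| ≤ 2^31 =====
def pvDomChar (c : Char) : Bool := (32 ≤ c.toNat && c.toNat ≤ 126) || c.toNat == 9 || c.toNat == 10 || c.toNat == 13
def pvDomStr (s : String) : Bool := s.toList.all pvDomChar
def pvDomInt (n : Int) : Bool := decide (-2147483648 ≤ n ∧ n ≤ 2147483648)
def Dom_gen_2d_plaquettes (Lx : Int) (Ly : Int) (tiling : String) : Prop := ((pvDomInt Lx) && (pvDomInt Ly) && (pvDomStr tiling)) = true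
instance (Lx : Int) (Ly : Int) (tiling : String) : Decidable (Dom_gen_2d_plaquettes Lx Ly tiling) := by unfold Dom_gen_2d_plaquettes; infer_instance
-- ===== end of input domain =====

-- B replaces A's generic plaquette-stepping helper (direction dict + reverse-step machinery)
-- by directly yielding the closed-form square corners over the truncated ranges; objective: simpler.
-- Both A and B are Python generators; equivalence is about the yielded sequence.

-- ===== PORT A =====
-- helper gen_2d_plaquette: forward loop collects step_backs, then the backward loop.
-- The Python dict {"x": …, "y": …}[d] is ported as an if on d ('x'/'y' are the only keys ever used:
-- steps are always "x+"/"y+" and step-backs are built from them, so the KeyError branch is unreachable).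
def gen_2d_plaquette (coo0 : Int × Int) (steps : List String) : List (List Int) :=
  let smap : PySem.Dict Char Int := PySem.Dict.ofList [('+', 1), ('-', -1)]
  -- first loop: for step in steps (state: x, y, step_backs, yielded-so-far)
  let st := steps.foldl
    (fun (st : Int × Int × List String × List (List Int)) step =>
      let x := st.1; let y := st.2.1; let sb := st.2.2.1; let out := st.2.2.2
      let d := step.toList.headD ' '     -- d, s = step
      let s := step.toList.getD 1 ' '
      let dv := (PySem.Dict.get? smap s).getD 0
      let xy : Int × Int := if d = 'x' then (x + dv, y) else (x, y + dv)
      (xy.1, xy.2, sb ++ [if s = '+' then String.ofList [d, '-'] else "-"], out ++ [[xy.1, xy.2]]))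
    (coo0.1, coo0.2, ([] : List String), [[coo0.1, coo0.2]])
  -- second loop: for step in step_backs
  let st2 := st.2.2.1.foldl
    (fun (st : Int × Int × List (List Int)) step =>
      let x := st.1; let y := st.2.1; let out := st.2.2
      let d := step.toList.headD ' '
      let s := step.toList.getD 1 ' '
      let dv := (PySem.Dict.get? smap s).getD 0
      let xy : Int × Int := if d = 'x' then (x + dv, y) else (x, y + dv)
      (xy.1, xy.2, out ++ [[xy.1, xy.2]]))
    (st.1, st.2.1, st.2.2.2)
  st2.2.2

-- the generator body of A; on the ValueError branch it returns [] (excluded by Pre_)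
def gen_2d_plaquettes (Lx : Int) (Ly : Int) (tiling : String) : List (List (List Int)) :=
  if tiling = "1" then
    (PySem.List.pyRange 0 Lx 1).foldl (fun acc x =>
      (PySem.List.pyRange 0 Ly 1).foldl (fun acc y =>
        if PySem.Int.mod (x + y) 2 = 0 ∧ (x < Lx - 1 ∧ y < Ly - 1) then
          acc ++ [gen_2d_plaquette (x, y) ["x+", "y+"]]
        else acc) acc) []
  else if tiling = "2" ∨ tiling = "full" then
    (PySem.List.pyRange 0 Lx 1).foldl (fun acc x =>
      (PySem.List.pyRange 0 Ly 1).foldl (fun acc y =>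
        if x < Lx - 1 ∧ y < Ly - 1 then
          acc ++ [gen_2d_plaquette (x, y) ["x+", "y+"]]
        else acc) acc) []
  else []  -- raise ValueError

-- ===== PORT B =====
-- closed-form square corners yielded at (x, y)
def pvPlaqB (x y : Int) : List (List Int) :=
  [[x, y], [x + 1, y], [x + 1, y + 1], [x, y + 1], [x, y]]

def gen_2d_plaquettes_alt (Lx : Int) (Ly : Int) (tiling : String) : List (List (List Int)) :=
  if tiling = "1" then
    (PySem.List.pyRange 0 (Lx - 1) 1).flatMap (fun x =>
      ((PySem.List.pyRange 0 (Ly - 1) 1).filter (fun y => PySem.Int.mod (x + y) 2 = 0)).map (pvPlaqB x))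
  else if tiling = "2" ∨ tiling = "full" then
    (PySem.List.pyRange 0 (Lx - 1) 1).flatMap (fun x =>
      (PySem.List.pyRange 0 (Ly - 1) 1).map (pvPlaqB x))
  else []  -- raise ValueError

-- ===== PRECONDITION & SPEC =====
-- Pre_ excludes exactly the tiling strings on which Python A (and B alike) raise ValueError.
def Pre_gen_2d_plaquettes (Lx : Int) (Ly : Int) (tiling : String) : Prop :=
  tiling = "1" ∨ tiling = "2" ∨ tiling = "full"
instance (Lx : Int) (Ly : Int) (tiling : String) : Decidable (Pre_gen_2d_plaquettes Lx Ly tiling) := by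
  unfold Pre_gen_2d_plaquettes; infer_instance

def pvWitness_gen_2d_plaquettes : Int × Int × String := (3, 3, "1")

def Spec_gen_2d_plaquettes (Lx : Int) (Ly : Int) (tiling : String) (out : List (List (List Int))) : Prop := out = gen_2d_plaquettes_alt Lx Ly tiling
instance (Lx : Int) (Ly : Int) (tiling : String) (out : List (List (List Int))) : Decidable (Spec_gen_2d_plaquettes Lx Ly tiling out) := by unfold Spec_gen_2d_plaquettes; infer_instance

-- ===== CLAIM (what is proved, stated in full; the proofs are below) =====
def Claim_equal_gen_2d_plaquettes : Prop := ∀ (Lx : Int) (Ly : Int) (tiling : String), Dom_gen_2d_plaquettes Lx Ly tiling → Pre_gen_2d_plaquettes Lx Ly tiling → Spec_gen_2d_plaquettes Lx Ly tiling (gen_2d_plaquettes Lx Ly tiling)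

-- ===== LEMMAS AND PROOFS =====

-- A's stepping helper at steps ("x+","y+") yields exactly B's closed-form corner list
theorem plaq_eq (x y : Int) : gen_2d_plaquette (x, y) ["x+", "y+"] = pvPlaqB x y := by
  have h1 : ("x+" : String).toList = ['x', '+'] := by decide
  have h2 : ("y+" : String).toList = ['y', '+'] := by decide
  have h3 : (String.ofList ['x', '-']).toList = ['x', '-'] := String.toList_ofList
  have h4 : (String.ofList ['y', '-']).toList = ['y', '-'] := String.toList_ofList
  simp [gen_2d_plaquette, pvPlaqB, h1, h2, h3, h4, PySem.Dict.ofList,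
    PySem.Dict.update, PySem.Dict.empty, PySem.Dict.insert, PySem.Dict.get?]

-- filtering 'y < n - 1' over range(n) is range(n - 1)
theorem filter_range_lt (n : Int) (p : Int → Bool) :
    (PySem.List.pyRange 0 n 1).filter (fun y => p y && decide (y < n - 1))
      = (PySem.List.pyRange 0 (n - 1) 1).filter p := by
  by_cases h : n ≤ 0
  · rw [PySem.List.pyRange_one_eq_nil h,
      PySem.List.pyRange_one_eq_nil (show n - 1 ≤ (0 : Int) by omega)]
    simp
  · have h1 : (0 : Int) ≤ n - 1 := by omega
    have hsplit : PySem.List.pyRange 0 n 1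
        = PySem.List.pyRange 0 (n - 1) 1 ++ [n - 1] := by
      have := PySem.List.pyRange_one_succ_right (a := 0) (b := n - 1) h1
      simpa [sub_add_cancel] using this
    have hcong : (PySem.List.pyRange 0 (n - 1) 1).filter (fun y => p y && decide (y < n - 1))
        = (PySem.List.pyRange 0 (n - 1) 1).filter p := by
      refine List.filter_congr (fun y hy => ?_)
      have := (PySem.List.mem_pyRange_one (a := 0) (b := n - 1)).1 hy
      simp [show y < n - 1 by omega]
    rw [hsplit, List.filter_append, hcong]
    simp

-- the main shape lemma: A's nested guarded foldl equals B's flatMap over truncated ranges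
theorem nested_eq (Lx Ly : Int) (q : Int → Int → Prop) [inst : ∀ x y, Decidable (q x y)]
    (p : Int → Int → Bool)
    (hq : ∀ x y, q x y ↔ (p x y = true ∧ (x < Lx - 1 ∧ y < Ly - 1)))
    (f : Int → Int → List (List Int)) :
    (PySem.List.pyRange 0 Lx 1).foldl (fun acc x =>
      (PySem.List.pyRange 0 Ly 1).foldl (fun acc y =>
        if q x y then acc ++ [f x y] else acc) acc) []
      = (PySem.List.pyRange 0 (Lx - 1) 1).flatMap (fun x =>
          ((PySem.List.pyRange 0 (Ly - 1) 1).filter (fun y => p x y)).map (f x)) := by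
  have hfilter : ∀ x : Int, (PySem.List.pyRange 0 Ly 1).filter (fun y => decide (q x y))
      = if x < Lx - 1 then (PySem.List.pyRange 0 (Ly - 1) 1).filter (fun y => p x y) else [] := by
    intro x
    by_cases hx : x < Lx - 1
    · rw [if_pos hx, ← filter_range_lt Ly (p x)]
      refine List.filter_congr (fun y _ => ?_)
      simp [hq, hx]
    · rw [if_neg hx]
      refine List.filter_eq_nil_iff.mpr (fun y _ => ?_)
      simp [hq, hx]
  have inner : ∀ (x : Int) (acc : List (List (List Int))),
      (PySem.List.pyRange 0 Ly 1).foldl (fun acc y =>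
        if q x y then acc ++ [f x y] else acc) acc
        = acc ++ (if x < Lx - 1 then
            ((PySem.List.pyRange 0 (Ly - 1) 1).filter (fun y => p x y)).map (f x) else []) := by
    intro x acc
    rw [PySem.List.foldl_append_ite]
    congr 1
    rw [hfilter x]
    split <;> simp
  have outer : ∀ (acc : List (List (List Int))),
      (PySem.List.pyRange 0 Lx 1).foldl (fun acc x =>
        (PySem.List.pyRange 0 Ly 1).foldl (fun acc y =>
          if q x y then acc ++ [f x y] else acc) acc) acc
        = acc ++ (PySem.List.pyRange 0 Lx 1).flatMap (fun x =>
            if x < Lx - 1 then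
              ((PySem.List.pyRange 0 (Ly - 1) 1).filter (fun y => p x y)).map (f x) else []) := by
    intro acc
    induction (PySem.List.pyRange 0 Lx 1) generalizing acc with
    | nil => simp
    | cons a t ih =>
      simp only [List.foldl_cons, List.flatMap_cons]
      rw [inner a acc, ih]
      simp [List.append_assoc]
  rw [outer []]
  simp only [List.nil_append]
  by_cases h : Lx ≤ 0
  · rw [PySem.List.pyRange_one_eq_nil h,
      PySem.List.pyRange_one_eq_nil (show Lx - 1 ≤ (0 : Int) by omega)]
    simp
  · have h1 : (0 : Int) ≤ Lx - 1 := by omega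
    have hsplit : PySem.List.pyRange 0 Lx 1
        = PySem.List.pyRange 0 (Lx - 1) 1 ++ [Lx - 1] := by
      have := PySem.List.pyRange_one_succ_right (a := 0) (b := Lx - 1) h1
      simpa [sub_add_cancel] using this
    have hcong : (PySem.List.pyRange 0 (Lx - 1) 1).flatMap (fun x =>
          if x < Lx - 1 then
            ((PySem.List.pyRange 0 (Ly - 1) 1).filter (fun y => p x y)).map (f x) else [])
        = (PySem.List.pyRange 0 (Lx - 1) 1).flatMap (fun x =>
            ((PySem.List.pyRange 0 (Ly - 1) 1).filter (fun y => p x y)).map (f x)) := by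
      refine List.flatMap_congr (fun x hx => ?_)
      have := (PySem.List.mem_pyRange_one (a := 0) (b := Lx - 1)).1 hx
      simp [show x < Lx - 1 by omega]
    rw [hsplit, List.flatMap_append, hcong]
    simp

-- ===== VERDICT (by name: the statement is the Claim_ definition above) =====
theorem gen_2d_plaquettes_spec : Claim_equal_gen_2d_plaquettes := by
  intro Lx Ly tiling _ hpre
  unfold Spec_gen_2d_plaquettes
  rcases hpre with h | h | h <;> subst h
  · -- tiling = "1"
    unfold gen_2d_plaquettes gen_2d_plaquettes_alt
    rw [if_pos rfl, if_pos rfl,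
      nested_eq Lx Ly _ (fun x y => decide (PySem.Int.mod (x + y) 2 = 0))
        (fun x y => by simp) (fun x y => gen_2d_plaquette (x, y) ["x+", "y+"])]
    refine List.flatMap_congr (fun x _ => ?_)
    simp [plaq_eq]
  · -- tiling = "2"
    have eA : gen_2d_plaquettes Lx Ly "2" = (PySem.List.pyRange 0 Lx 1).foldl (fun acc x =>
        (PySem.List.pyRange 0 Ly 1).foldl (fun acc y =>
          if x < Lx - 1 ∧ y < Ly - 1 then
            acc ++ [gen_2d_plaquette (x, y) ["x+", "y+"]]
          else acc) acc) [] := by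
      unfold gen_2d_plaquettes
      rw [if_neg (by decide), if_pos (by decide)]
    have eB : gen_2d_plaquettes_alt Lx Ly "2" = (PySem.List.pyRange 0 (Lx - 1) 1).flatMap (fun x =>
        (PySem.List.pyRange 0 (Ly - 1) 1).map (pvPlaqB x)) := by
      unfold gen_2d_plaquettes_alt
      rw [if_neg (by decide), if_pos (by decide)]
    rw [eA, eB, nested_eq Lx Ly _ (fun _ _ => true) (fun x y => by simp)
        (fun x y => gen_2d_plaquette (x, y) ["x+", "y+"])]
    refine List.flatMap_congr (fun x _ => ?_)
    simp [plaq_eq]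
  · -- tiling = "full"
    have eA : gen_2d_plaquettes Lx Ly "full" = (PySem.List.pyRange 0 Lx 1).foldl (fun acc x =>
        (PySem.List.pyRange 0 Ly 1).foldl (fun acc y =>
          if x < Lx - 1 ∧ y < Ly - 1 then
            acc ++ [gen_2d_plaquette (x, y) ["x+", "y+"]]
          else acc) acc) [] := by
      unfold gen_2d_plaquettes
      rw [if_neg (by decide), if_pos (by decide)]
    have eB : gen_2d_plaquettes_alt Lx Ly "full" = (PySem.List.pyRange 0 (Lx - 1) 1).flatMap (fun x =>
        (PySem.List.pyRange 0 (Ly - 1) 1).map (pvPlaqB x)) := by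
      unfold gen_2d_plaquettes_alt
      rw [if_neg (by decide), if_pos (by decide)]
    rw [eA, eB, nested_eq Lx Ly _ (fun _ _ => true) (fun x y => by simp)
        (fun x y => gen_2d_plaquette (x, y) ["x+", "y+"])]
    refine List.flatMap_congr (fun x _ => ?_)
    simp [plaq_eq]
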